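-- pv_equiv track=rewrite | github.com/Srisai-Sudharam/Daily_Learning_Data_Structures_and_Algorithms | 100days/Day - 7/Make Unique Array.py | minElementsToRemove
-- ===== SOURCE A (Python) =====
-- def minElementsToRemove(arr):
--     hash = {}
--     count = 0
--     for i in arr:
--         if hash.get(i):
--             count += 1
--         else:
--             hash[i] = True
--     return count
-- ===== SOURCE B (Python) =====
-- def minElementsToRemove(arr):
--     s = sorted(arr)
--     count = 0
--     for a, b in zip(s, s[1:]):
--         if a == b:
--             count += 1
--     return count
-- ===== Notes on version B (the rewrite author's own statement) =====
-- stated objective: alternative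
-- what changed: Replaces A's one-pass seen-dict-and-counter loop with sort-then-scan: sort the array and count adjacent equal pairs, which equals the number of duplicates since equal elements are adjacent after sorting.
import Mathlib
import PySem

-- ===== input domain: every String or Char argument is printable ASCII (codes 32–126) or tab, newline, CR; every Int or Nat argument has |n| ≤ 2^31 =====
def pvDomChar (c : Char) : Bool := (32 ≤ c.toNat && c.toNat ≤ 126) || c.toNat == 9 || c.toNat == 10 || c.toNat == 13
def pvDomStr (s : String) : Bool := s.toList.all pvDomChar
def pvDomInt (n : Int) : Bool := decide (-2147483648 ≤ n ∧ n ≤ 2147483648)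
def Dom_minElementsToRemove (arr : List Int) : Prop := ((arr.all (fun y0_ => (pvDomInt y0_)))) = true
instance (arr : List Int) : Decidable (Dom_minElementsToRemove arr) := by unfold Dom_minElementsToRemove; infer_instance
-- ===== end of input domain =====

-- B replaces A's seen-dict-and-counter loop with sort-then-scan (sort, then count adjacent equal pairs); objective: alternative algorithm.


-- ===== PORT A =====
-- literal port: loop over arr with the dict `hash` and the counter `count`
def minElementsToRemove (arr : List Int) : Int :=
  (arr.foldl
    (fun (st : PySem.Dict Int Bool × Int) i =>
      if st.1.getD i false then (st.1, st.2 + 1)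
      else (st.1.insert i true, st.2))
    (PySem.Dict.empty, 0)).2

-- ===== PORT B =====
-- literal port of Source B: s = sorted(arr); for a, b in zip(s, s[1:]): if a == b: count += 1
def minElementsToRemove_alt (arr : List Int) : Int :=
  let s := PySem.List.sorted arr (fun x => x) false
  (s.zip (s.drop 1)).foldl (fun (count : Int) p => if p.1 == p.2 then count + 1 else count) 0

-- ===== PRECONDITION & SPEC =====
def Spec_minElementsToRemove (arr : List Int) (out : Int) : Prop := out = minElementsToRemove_alt arr
instance (arr : List Int) (out : Int) : Decidable (Spec_minElementsToRemove arr out) := by unfold Spec_minElementsToRemove; infer_instance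

-- ===== CLAIM (what is proved, stated in full; the proofs are below) =====
def Claim_equal_minElementsToRemove : Prop := ∀ (arr : List Int), Dom_minElementsToRemove arr → Spec_minElementsToRemove arr (minElementsToRemove arr)

-- ===== LEMMAS AND PROOFS =====

-- The dict A builds over a seen-list s: every key maps to `true`
def pvDictOf (s : List Int) : PySem.Dict Int Bool := PySem.Dict.mk (s.map (fun k => (k, true)))

theorem pvGet?_dictOf (s : List Int) (i : Int) :
    (pvDictOf s).get? i = if i ∈ s then some true else none := by
  induction s with
  | nil => simp [pvDictOf, PySem.Dict.get?]
  | cons k t ih =>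
      simp only [pvDictOf, List.map_cons, PySem.Dict.get?_mk_cons, List.mem_cons] at *
      by_cases h : i = k
      · subst h; simp
      · have hb : (k == i) = false := by simp [Ne.symm h]
        simp [hb, h, ih]

theorem pvGetD_dictOf (s : List Int) (i : Int) :
    (pvDictOf s).getD i false = decide (i ∈ s) := by
  rw [PySem.Dict.getD_eq_get?_getD, pvGet?_dictOf]
  by_cases h : i ∈ s <;> simp [h]

theorem pvInsert_dictOf (s : List Int) (x : Int) (h : x ∉ s) :
    (pvDictOf s).insert x true = pvDictOf (s ++ [x]) := by
  have hc : (pvDictOf s).contains x = false := by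
    rw [PySem.Dict.contains_eq_isSome_get?, pvGet?_dictOf]
    simp [h]
  apply PySem.Dict.ext
  rw [PySem.Dict.items_insert_of_not_contains (d := pvDictOf s) (h := hc)]
  simp [pvDictOf]

-- loop invariant for A's fold, starting from the dict of an arbitrary seen-list s
theorem pvFold_inv (l s : List Int) (c : Int) :
    l.foldl
      (fun (st : PySem.Dict Int Bool × Int) i =>
        if st.1.getD i false then (st.1, st.2 + 1)
        else (st.1.insert i true, st.2))
      (pvDictOf s, c)
    = (pvDictOf (PySem.Set.update s l),
       c + l.length - (PySem.Set.update s l).length + s.length) := by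
  induction l generalizing s c with
  | nil => simp [PySem.Set.update]
  | cons x t ih =>
      simp only [List.foldl_cons, pvGetD_dictOf]
      by_cases h : x ∈ s
      · have hadd : PySem.Set.add s x = s := by
          simp [PySem.Set.add, PySem.Set.contains, h]
        have hupd : PySem.Set.update s (x :: t) = PySem.Set.update s t := by
          simp [PySem.Set.update, hadd]
        simp only [h, decide_true, if_true, ih, hupd, Prod.mk.injEq]
        refine ⟨trivial, by simp only [List.length_cons]; push_cast; ring⟩
      · have hadd : PySem.Set.add s x = s ++ [x] := by
          simp [PySem.Set.add, PySem.Set.contains, h]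
        have hupd : PySem.Set.update s (x :: t) = PySem.Set.update (s ++ [x]) t := by
          simp [PySem.Set.update, hadd]
        simp only [h, decide_false, Bool.false_eq_true, if_false,
          pvInsert_dictOf s x h, ih, hupd, Prod.mk.injEq]
        refine ⟨trivial, by simp only [List.length_cons, List.length_append, List.length_nil]; push_cast; ring⟩

-- A's result in closed form: length minus number of distinct values
theorem pvA_closed (arr : List Int) :
    minElementsToRemove arr = (arr.length : Int) - (PySem.Set.ofList arr).length := by
  unfold minElementsToRemove
  have h0 : pvDictOf [] = PySem.Dict.empty := rfl
  rw [← h0, pvFold_inv]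
  have : PySem.Set.update [] arr = PySem.Set.ofList arr := by
    simp [PySem.Set.update, PySem.Set.ofList_eq_foldl]
  rw [this]
  simp only [List.length_nil]
  push_cast
  ring

-- B's counter fold as a countP
theorem pvFold_count (l : List (Int × Int)) (n : Int) :
    l.foldl (fun (count : Int) p => if p.1 == p.2 then count + 1 else count) n
      = n + (l.countP (fun p => p.1 == p.2) : Int) := by
  induction l generalizing n with
  | nil => simp
  | cons x t ih =>
      rw [List.foldl_cons, List.countP_cons, ih]
      by_cases h : x.1 = x.2
      · simp only [h, beq_self_eq_true, if_true]
        push_cast; ring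
      · have hne : (x.1 == x.2) = false := by simp [h]
        simp only [hne]
        push_cast; ring

-- distinct count = toFinset.card
theorem pvOfList_len (l : List Int) : (PySem.Set.ofList l).length = l.toFinset.card := by
  have hn : (PySem.Set.ofList l).Nodup := PySem.Set.nodup_ofList l
  have hfs : (PySem.Set.ofList l).toFinset = l.toFinset := by
    ext x; simp [List.mem_toFinset, PySem.Set.mem_ofList]
  calc (PySem.Set.ofList l).length = (PySem.Set.ofList l).toFinset.card :=
        (List.toFinset_card_of_nodup hn).symm
    _ = l.toFinset.card := by rw [hfs]

-- for a ≤-sorted list, adjacent-equal pairs + distinct count = length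
theorem pvSorted_adj (s : List Int) (hs : s.Pairwise (· ≤ ·)) :
    (s.zip (s.drop 1)).countP (fun p => p.1 == p.2) + s.toFinset.card = s.length := by
  induction s with
  | nil => simp
  | cons a rest ih =>
      cases rest with
      | nil => simp
      | cons b t =>
          have hpr : (b :: t).Pairwise (· ≤ ·) := hs.tail
          have hab : a ≤ b := (List.pairwise_cons.mp hs).1 b (by simp)
          have hih := ih hpr
          simp only [List.drop_succ_cons, List.drop_zero, List.length_cons] at hih ⊢
          rw [List.zip_cons_cons, List.countP_cons]
          by_cases h : a = b
          · subst h
            have hfin : (a :: a :: t).toFinset = (a :: t).toFinset := by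
              simp [List.toFinset_cons]
            rw [hfin]
            simp only [beq_self_eq_true, if_true]
            omega
          · have halt : a < b := lt_of_le_of_ne hab h
            have hnot : a ∉ (b :: t).toFinset := by
              rw [List.mem_toFinset]
              intro hx
              rcases List.mem_cons.mp hx with h1 | h1
              · exact h h1
              · have hby : b ≤ a := (List.pairwise_cons.mp hpr).1 a h1
                exact absurd (lt_of_lt_of_le halt hby) (lt_irrefl a)
            have hcard : (a :: b :: t).toFinset.card = (b :: t).toFinset.card + 1 := by
              rw [List.toFinset_cons]; exact Finset.card_insert_of_notMem hnot
            have hne : (a == b) = false := by simp [h]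
            rw [hcard]
            simp only [hne, Bool.false_eq_true, if_false]
            omega

-- ===== VERDICT (by name: the statement is the Claim_ definition above) =====
theorem minElementsToRemove_spec : Claim_equal_minElementsToRemove := by
  intro arr _
  show minElementsToRemove arr = minElementsToRemove_alt arr
  rw [pvA_closed]
  unfold minElementsToRemove_alt
  set s := PySem.List.sorted arr (fun x => x) false with hsdef
  rw [pvFold_count]
  have hperm : s.Perm arr := PySem.List.sorted_perm arr (fun x => x) false
  have hpw : s.Pairwise (· ≤ ·) := by
    have := PySem.List.sorted_pairwise arr (fun x => x)
    simpa [hsdef] using this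
  have hadj := pvSorted_adj s hpw
  have hlen : s.length = arr.length := hperm.length_eq
  have hfs : s.toFinset = arr.toFinset := List.toFinset_eq_of_perm _ _ hperm
  rw [pvOfList_len, ← hfs, ← hlen]
  omega
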